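-- pv_equiv track=rewrite | github.com/Nirajan2005/crispr-simulator | utils/sequence_utils.py | find_pam_sites
-- ===== SOURCE A (Python) =====
-- IUPAC_CODES = {
--     'A': 'A',
--     'C': 'C',
--     'G': 'G',
--     'T': 'T',
--     'U': 'U',
--     'R': 'AG',
--     'Y': 'CT',
--     'S': 'GC',
--     'W': 'AT',
--     'K': 'GT',
--     'M': 'AC',
--     'B': 'CGT',
--     'D': 'AGT',
--     'H': 'ACT',
--     'V': 'ACG',
--     'N': 'ACGT',
--     '.': '-',
--     '-': '-',
--     ' ': ' '
-- }
--
-- def is_valid_pam(pam_seq: str, pam_pattern: str) -> bool: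
--     """
--     Check if a PAM sequence matches the given PAM pattern.
--
--     Args:
--         pam_seq: PAM sequence to check
--         pam_pattern: PAM pattern in IUPAC format
--
--     Returns:
--         True if the sequence matches the pattern, False otherwise
--     """
--     if len(pam_seq) != len(pam_pattern):
--         return False
--
--     for base, pat in zip(pam_seq.upper(), pam_pattern.upper()):
--         if base not in IUPAC_CODES.get(pat, pat):
--             return False
--     return True
--
-- def find_pam_sites(sequence: str, pam_pattern: str) -> list:
--     """
--     Find all PAM sites in a DNA sequence.
--
--     Args:
--         sequence: DNA sequence to search in
--         pam_pattern: PAM pattern in IUPAC format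
--
--     Returns:
--         List of (position, pam_sequence) tuples
--     """
--     sites = []
--     pam_len = len(pam_pattern)
--     sequence = sequence.upper()
--
--     for i in range(len(sequence) - pam_len + 1):
--         pam_candidate = sequence[i:i+pam_len]
--         if is_valid_pam(pam_candidate, pam_pattern):
--             sites.append((i, pam_candidate))
--
--     return sites
-- ===== SOURCE B (Python) =====
-- IUPAC_CODES = {
--     'A': 'A', 'C': 'C', 'G': 'G', 'T': 'T', 'U': 'U',
--     'R': 'AG', 'Y': 'CT', 'S': 'GC', 'W': 'AT', 'K': 'GT', 'M': 'AC',
--     'B': 'CGT', 'D': 'AGT', 'H': 'ACT', 'V': 'ACG', 'N': 'ACGT',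
--     '.': '-', '-': '-', ' ': ' '
-- }
--
-- def find_pam_sites(sequence: str, pam_pattern: str) -> list:
--     """Pattern-major scan: start with every window start, then for each
--     pattern position narrow the surviving starts by one character-class test."""
--     seq = sequence.upper()
--     pat = pam_pattern.upper()
--     k = len(pat)
--     positions = list(range(len(seq) - k + 1))
--     for j, c in enumerate(pat):
--         allowed = set(IUPAC_CODES.get(c, c))
--         positions = [i for i in positions if seq[i + j] in allowed]
--     return [(i, seq[i:i + k]) for i in positions]
-- ===== Notes on version B (the rewrite author's own statement) =====
-- stated objective: alternative
-- what changed: Replaces A's position-major window scan (slice every window, re-uppercase it and re-look-up the IUPAC dict per character inside is_valid_pam) with a pattern-major scan: each pattern character's IUPAC class is compiled to a set once and used to filter the list of surviving window starts, so the helper and per-window dict lookups disappear.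
import Mathlib
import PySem

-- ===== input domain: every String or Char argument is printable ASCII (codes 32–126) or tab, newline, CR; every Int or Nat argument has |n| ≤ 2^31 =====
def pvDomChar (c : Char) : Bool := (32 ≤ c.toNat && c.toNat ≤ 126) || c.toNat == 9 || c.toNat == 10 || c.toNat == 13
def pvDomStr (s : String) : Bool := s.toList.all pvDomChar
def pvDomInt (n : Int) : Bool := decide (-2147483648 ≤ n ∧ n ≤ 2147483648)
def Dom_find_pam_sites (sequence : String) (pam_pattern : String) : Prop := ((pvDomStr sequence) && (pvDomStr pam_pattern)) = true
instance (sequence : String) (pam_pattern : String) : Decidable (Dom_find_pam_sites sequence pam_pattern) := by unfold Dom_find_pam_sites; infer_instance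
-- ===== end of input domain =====

-- B replaces A's position-major window scan (slice + per-window is_valid_pam re-uppercasing
-- and re-looking-up the IUPAC dict) by a pattern-major scan that compiles each pattern
-- character's class once and filters the surviving window starts; alternative, same cost.

-- module constant IUPAC_CODES (shared by both Python versions)
def iupacCodes : PySem.Dict Char String := PySem.Dict.ofList
  [('A', "A"), ('C', "C"), ('G', "G"), ('T', "T"), ('U', "U"),
   ('R', "AG"), ('Y', "CT"), ('S', "GC"), ('W', "AT"), ('K', "GT"), ('M', "AC"),
   ('B', "CGT"), ('D', "AGT"), ('H', "ACT"), ('V', "ACG"), ('N', "ACGT"),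
   ('.', "-"), ('-', "-"), (' ', " ")]

-- ===== PORT A =====
def is_valid_pam (pam_seq : String) (pam_pattern : String) : Bool :=
  if pam_seq.toList.length ≠ pam_pattern.toList.length then false
  else
    -- 'for base, pat in zip(...): if base not in IUPAC_CODES.get(pat, pat): return False / return True'
    ((PySem.Str.upper pam_seq).toList.zip (PySem.Str.upper pam_pattern).toList).all
      (fun bp => ((iupacCodes.get? bp.2).getD (String.ofList [bp.2])).toList.contains bp.1)

def find_pam_sites (sequence : String) (pam_pattern : String) : List (Int × String) :=
  let pam_len : Int := pam_pattern.toList.length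
  let seq := PySem.Str.upper sequence
  (PySem.List.pyRange 0 ((seq.toList.length : Int) - pam_len + 1)).foldl
    (fun sites i =>
      let pam_candidate := String.ofList (PySem.List.slice seq.toList (some i) (some (i + pam_len)))
      if is_valid_pam pam_candidate pam_pattern then sites ++ [(i, pam_candidate)] else sites)
    []

-- ===== PORT B =====
def find_pam_sites_alt (sequence : String) (pam_pattern : String) : List (Int × String) :=
  let seq := (PySem.Str.upper sequence).toList
  let pat := (PySem.Str.upper pam_pattern).toList
  let k : Int := pat.length
  let positions0 : List Int := PySem.List.pyRange 0 ((seq.length : Int) - k + 1)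
  let positions := (PySem.List.enumerate pat).foldl
    (fun ps jc =>
      let allowed := PySem.Set.ofList ((iupacCodes.get? jc.2).getD (String.ofList [jc.2])).toList
      ps.filter (fun i => (PySem.List.pyGet? seq (i + jc.1)).any (fun c => allowed.contains c)))
    positions0
  positions.map (fun i => (i, String.ofList (PySem.List.slice seq (some i) (some (i + k)))))

-- ===== PRECONDITION & SPEC =====
def Spec_find_pam_sites (sequence : String) (pam_pattern : String) (out : List (Int × String)) : Prop := out = find_pam_sites_alt sequence pam_pattern
instance (sequence : String) (pam_pattern : String) (out : List (Int × String)) : Decidable (Spec_find_pam_sites sequence pam_pattern out) := by unfold Spec_find_pam_sites; infer_instance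

-- ===== CLAIM (what is proved, stated in full; the proofs are below) =====
def Claim_equal_find_pam_sites : Prop := ∀ (sequence : String) (pam_pattern : String), Dom_find_pam_sites sequence pam_pattern → Spec_find_pam_sites sequence pam_pattern (find_pam_sites sequence pam_pattern)

-- ===== LEMMAS AND PROOFS =====

-- the per-character test both versions perform
def pvOk (b c : Char) : Bool :=
  ((iupacCodes.get? c).getD (String.ofList [c])).toList.contains b

-- common recursive matcher: pattern p matched against s starting at absolute index a
def pvMatch (s : List Char) : Nat → List Char → Bool
  | _, [] => true
  | a, c :: p' => (s[a]?.any (fun b => pvOk b c)) && pvMatch s (a + 1) p'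

theorem pvUpperChar_idem (c : Char) :
    PySem.Chars.upperChar (PySem.Chars.upperChar c) = PySem.Chars.upperChar c := by
  unfold PySem.Chars.upperChar
  by_cases h : PySem.Chars.islower c = true
  · simp only [h, if_true]
    have hc : ('a' ≤ c ∧ c ≤ 'z') := by
      have := h; unfold PySem.Chars.islower at this; simpa using this
    have hv : (c.toNat - 32).isValidChar := by
      unfold Nat.isValidChar
      have h1 : 97 ≤ c.toNat := hc.1
      have h2 : c.toNat ≤ 122 := hc.2
      omega
    have ht : (Char.ofNat (c.toNat - 32)).toNat = c.toNat - 32 := by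
      rw [Char.toNat_ofNat]; simp [hv]
    have hnl : PySem.Chars.islower (Char.ofNat (c.toNat - 32)) = false := by
      unfold PySem.Chars.islower
      have h1 : 97 ≤ c.toNat := hc.1
      have h2 : c.toNat ≤ 122 := hc.2
      have hx : (Char.ofNat (c.toNat - 32)).toNat ≤ 90 := by omega
      have : ¬ ('a' ≤ Char.ofNat (c.toNat - 32)) := by
        intro hle
        rw [Char.le_def, UInt32.le_iff_toNat_le] at hle
        exact absurd (le_trans hle hx) (by decide)
      simp [this]
    simp [hnl]
  · simp [h]

theorem pvUpper_take_drop_fix (l : List Char) (m n : Nat) :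
    PySem.Chars.upper (List.take n (List.drop m (PySem.Chars.upper l)))
      = List.take n (List.drop m (PySem.Chars.upper l)) := by
  unfold PySem.Chars.upper
  rw [List.map_take, List.map_drop, List.map_map]
  have : List.map (PySem.Chars.upperChar ∘ PySem.Chars.upperChar) l
      = List.map PySem.Chars.upperChar l :=
    List.map_congr_left (fun a _ => pvUpperChar_idem a)
  rw [this]

-- A's zip test over a length-|p| window equals the matcher
theorem pvZip_all_eq_match (s : List Char) :
    ∀ (p : List Char) (a : Nat), a + p.length ≤ s.length →
      ((List.take p.length (List.drop a s)).zip p).all (fun bp => pvOk bp.1 bp.2)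
        = pvMatch s a p := by
  intro p
  induction p with
  | nil => intro a _; simp [pvMatch]
  | cons c p' ih =>
    intro a h
    have ha : a < s.length := by simp at h; omega
    rw [List.drop_eq_getElem_cons ha]
    simp only [List.length_cons, List.take_succ_cons, List.zip_cons_cons, List.all_cons]
    rw [ih (a + 1) (by simp at h ⊢; omega)]
    simp [pvMatch, List.getElem?_eq_getElem ha, Option.any]

-- B's enumerate-driven test equals the matcher
theorem pvEnum_all_eq_match (s : List Char) :
    ∀ (p : List Char) (t : Nat) (i : Int), 0 ≤ i →
      (PySem.List.enumerate p (t : Int)).all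
          (fun jc => (PySem.List.pyGet? s (i + jc.1)).any
            (fun c => (PySem.Set.ofList ((iupacCodes.get? jc.2).getD (String.ofList [jc.2])).toList).contains c))
        = pvMatch s (i.toNat + t) p := by
  intro p
  induction p with
  | nil => intro t i _; simp [PySem.List.enumerate, pvMatch]
  | cons c p' ih =>
    intro t i hi
    rw [PySem.List.enumerate_cons]
    simp only [List.all_cons]
    have h1 : (t : Int) + 1 = ((t + 1 : Nat) : Int) := by push_cast; ring
    rw [h1, ih (t + 1) i hi]
    have h2 : PySem.List.pyGet? s (i + (t : Int)) = s[(i.toNat + t)]? := by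
      rw [PySem.List.pyGet?_of_nonneg s (by omega)]
      congr 1
      omega
    rw [h2]
    have h4 : i.toNat + t + 1 = i.toNat + (t + 1) := by omega
    rw [pvMatch, ← h4]
    congr 1
    cases s[(i.toNat + t)]? with
    | none => simp [Option.any]
    | some b => simp [Option.any, pvOk]

-- folding per-character filters = one filter by the conjunction of all tests
theorem pvFoldl_filter_all {α β : Type} (q : β → α → Bool) :
    ∀ (l : List β) (ps : List α),
      l.foldl (fun ps jc => ps.filter (q jc)) ps
        = ps.filter (fun i => l.all (fun jc => q jc i)) := by
  intro l
  induction l with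
  | nil => intro ps; simp
  | cons b l' ih =>
    intro ps
    rw [List.foldl_cons, ih, List.filter_filter]
    refine List.filter_congr ?_
    intro x _
    simp [Bool.and_comm]

theorem find_pam_sites_eq (sequence pam_pattern : String) :
    find_pam_sites sequence pam_pattern = find_pam_sites_alt sequence pam_pattern := by
  unfold find_pam_sites find_pam_sites_alt
  simp only [PySem.Str.toList_upper]
  set s : List Char := PySem.Chars.upper sequence.toList with hs
  set p : List Char := PySem.Chars.upper pam_pattern.toList with hp
  have hplen : (p.length : Int) = (pam_pattern.toList.length : Int) := by
    rw [hp]; unfold PySem.Chars.upper; simp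
  rw [PySem.List.foldl_append_if
        (fun i => is_valid_pam (String.ofList (PySem.List.slice s (some i) (some (i + (pam_pattern.toList.length : Int))))) pam_pattern)
        (fun i => (i, String.ofList (PySem.List.slice s (some i) (some (i + (pam_pattern.toList.length : Int))))))]
  rw [pvFoldl_filter_all
        (fun jc i => (PySem.List.pyGet? s (i + jc.1)).any
          (fun c => (PySem.Set.ofList ((iupacCodes.get? jc.2).getD (String.ofList [jc.2])).toList).contains c))
        (PySem.List.enumerate p)]
  simp only [List.nil_append]
  rw [← hplen]
  congr 1
  refine List.filter_congr ?_
  intro i hm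
  rw [PySem.List.mem_pyRange_one] at hm
  obtain ⟨hi0, hilt⟩ := hm
  have hbound : i.toNat + p.length ≤ s.length := by omega
  have hslice : PySem.List.slice s (some i) (some (i + (p.length : Int)))
      = List.take p.length (List.drop i.toNat s) := by
    rw [PySem.List.slice_toNat s hi0 (by omega)]
    congr 1
    omega

  rw [hslice]
  -- A side
  unfold is_valid_pam
  have hlen : (List.take p.length (List.drop i.toNat s)).length = p.length := by
    simp; omega
  have hlen' : (String.ofList (List.take p.length (List.drop i.toNat s))).toList
      = List.take p.length (List.drop i.toNat s) := by simp
  rw [hlen']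
  have hlenpat : p.length = pam_pattern.toList.length := by
    have := hplen; omega
  rw [if_neg (by rw [hlen, hlenpat]; simp)]
  have hupfix : (PySem.Str.upper (String.ofList (List.take p.length (List.drop i.toNat s)))).toList
      = List.take p.length (List.drop i.toNat s) := by
    rw [PySem.Str.toList_upper, hlen']
    rw [hs]
    exact pvUpper_take_drop_fix sequence.toList i.toNat p.length
  rw [hupfix, PySem.Str.toList_upper, ← hp]
  simp only [← pvOk.eq_def]
  rw [pvZip_all_eq_match s p i.toNat hbound]
  have h5 := pvEnum_all_eq_match s p 0 i hi0
  simp only [Nat.cast_zero, Nat.add_zero] at h5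
  rw [← h5]

-- ===== VERDICT (by name: the statement is the Claim_ definition above) =====
theorem find_pam_sites_spec : Claim_equal_find_pam_sites := by
  intro sequence pam_pattern _
  unfold Spec_find_pam_sites
  exact find_pam_sites_eq sequence pam_pattern
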